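-- pv_equiv track=rewrite | github.com/bhagavadgitadu22/BRCLimsCuration | python/krona_and_map/old_krona/base_krona.py | addFather
-- ===== SOURCE A (Python) =====
-- def addFather(line_genus, nodes_cleared, names_cleared, father):
--     fatherName = names_cleared[father][0]
--     grandFather = nodes_cleared[father][0]
--     typeGrandFather = nodes_cleared[father][1]
--
--     if grandFather != '1':
--         if typeGrandFather in ['domain', 'phylum', 'class', 'order', 'family', 'genus', 'superkingdom']:
--             line_genus.append(fatherName)
--         line_genus = addFather(line_genus, nodes_cleared, names_cleared, grandFather)
--
--     return line_genus
-- ===== SOURCE B (Python) =====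
-- def addFather(line_genus, nodes_cleared, names_cleared, father):
--     ranks = {'domain', 'phylum', 'class', 'order', 'family', 'genus', 'superkingdom'}
--     chain = []
--     cur = father
--     while nodes_cleared[cur][0] != '1':
--         chain.append(cur)
--         cur = nodes_cleared[cur][0]
--     line_genus += [names_cleared[k][0] for k in chain if nodes_cleared[k][1] in ranks]
--     return line_genus
-- ===== Notes on version B (the rewrite author's own statement) =====
-- stated objective: alternative
-- what changed: Replaces the tail recursion that interleaves name lookups and appends at every level with a two-phase iteration: an explicit loop first collects the ancestor chain, then a single comprehension appends the names of qualifying ranks.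
import Mathlib
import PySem

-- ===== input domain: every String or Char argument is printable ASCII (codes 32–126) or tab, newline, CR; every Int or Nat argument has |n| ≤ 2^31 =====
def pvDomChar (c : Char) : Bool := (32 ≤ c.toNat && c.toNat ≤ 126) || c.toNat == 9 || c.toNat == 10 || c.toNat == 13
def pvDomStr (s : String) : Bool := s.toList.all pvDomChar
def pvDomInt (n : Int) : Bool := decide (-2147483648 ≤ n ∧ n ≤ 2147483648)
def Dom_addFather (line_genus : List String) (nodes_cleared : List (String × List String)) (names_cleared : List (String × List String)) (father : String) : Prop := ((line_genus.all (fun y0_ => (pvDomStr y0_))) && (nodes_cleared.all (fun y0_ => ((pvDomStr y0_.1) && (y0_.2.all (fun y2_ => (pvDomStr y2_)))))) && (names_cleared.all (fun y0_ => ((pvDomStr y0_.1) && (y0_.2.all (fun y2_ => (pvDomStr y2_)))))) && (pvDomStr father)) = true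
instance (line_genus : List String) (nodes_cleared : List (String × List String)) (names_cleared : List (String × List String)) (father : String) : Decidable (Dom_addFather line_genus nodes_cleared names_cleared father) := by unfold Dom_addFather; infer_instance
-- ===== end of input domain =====

-- B replaces A's tail recursion (lookups and appends interleaved at every level) by a two-phase
-- iteration: collect the ancestor chain first, then append qualifying names in one comprehension.
-- Both A and B mutate the `line_genus` list in place and return the same object; the equivalence
-- proved here is about the returned value.

-- ===== PORT A =====
-- the rank list A's membership test uses
def pvRanks : List String := ["domain", "phylum", "class", "order", "family", "genus", "superkingdom"]

-- dict access d[k]: first-match lookup; the `.getD []` default only guards totality —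
-- Pre_addFather excludes every input on which Python raises KeyError here
def pvGet (d : List (String × List String)) (k : String) : List String := (d.lookup k).getD []

-- A's recursion, with fuel only as a totality guard (Pre_addFather bounds the chain length)
def pvAddFatherGo (nodes_cleared names_cleared : List (String × List String)) : Nat → List String → String → List String
  | 0, line_genus, _ => line_genus
  | fuel + 1, line_genus, father =>
    let fatherName := (pvGet names_cleared father).getD 0 ""
    let grandFather := (pvGet nodes_cleared father).getD 0 ""
    let typeGrandFather := (pvGet nodes_cleared father).getD 1 ""
    if grandFather ≠ "1" then
      pvAddFatherGo nodes_cleared names_cleared fuel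
        (if pvRanks.contains typeGrandFather then line_genus ++ [fatherName] else line_genus)
        grandFather
    else line_genus

def addFather (line_genus : List String) (nodes_cleared : List (String × List String)) (names_cleared : List (String × List String)) (father : String) : List String :=
  pvAddFatherGo nodes_cleared names_cleared (nodes_cleared.length + 2) line_genus father

-- ===== PORT B =====
-- phase 1 of B: the while loop collecting the chain of ancestors (fuel = totality guard)
def pvChain (nodes_cleared : List (String × List String)) : Nat → String → List String
  | 0, _ => []
  | fuel + 1, cur =>
    if (pvGet nodes_cleared cur).getD 0 "" ≠ "1" then
      cur :: pvChain nodes_cleared fuel ((pvGet nodes_cleared cur).getD 0 "")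
    else []

def addFather_alt (line_genus : List String) (nodes_cleared : List (String × List String)) (names_cleared : List (String × List String)) (father : String) : List String :=
  -- phase 2 of B: the comprehension over the collected chain
  line_genus ++ (pvChain nodes_cleared (nodes_cleared.length + 2) father).filterMap
    (fun k => if pvRanks.contains ((pvGet nodes_cleared k).getD 1 "") then some ((pvGet names_cleared k).getD 0 "") else none)

-- ===== PRECONDITION & SPEC =====
-- one valid parent-pointer step: k's entries exist and are long enough for every access A makes at k
def pvParent? (nodes_cleared names_cleared : List (String × List String)) (k : String) : Option String :=
  match names_cleared.lookup k, nodes_cleared.lookup k with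
  | some nv, some gv => if 1 ≤ nv.length ∧ 2 ≤ gv.length then some (gv.getD 0 "") else none
  | _, _ => none

def pvIter (nodes_cleared names_cleared : List (String × List String)) : Nat → String → Option String
  | 0, k => some k
  | n + 1, k => (pvParent? nodes_cleared names_cleared k).bind (pvIter nodes_cleared names_cleared n)

-- Pre: the parent-pointer chain from `father` reaches '1' within |nodes_cleared| steps, every visited
-- node having dict entries long enough for A's accesses — exactly the inputs where Python A returns
-- (elsewhere it raises KeyError/IndexError, or recurses forever on a cycle).
def Pre_addFather (line_genus : List String) (nodes_cleared : List (String × List String)) (names_cleared : List (String × List String)) (father : String) : Prop :=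
  ((List.range (nodes_cleared.length + 1)).any
    (fun i => pvIter nodes_cleared names_cleared (i + 1) father == some "1")) = true
instance (line_genus : List String) (nodes_cleared : List (String × List String)) (names_cleared : List (String × List String)) (father : String) : Decidable (Pre_addFather line_genus nodes_cleared names_cleared father) := by unfold Pre_addFather; infer_instance

def pvWitness_addFather : List String × (List (String × List String)) × (List (String × List String)) × String :=
  (["x"], [("a", ["b", "species"]), ("b", ["1", "genus"])], [("a", ["Alpha"]), ("b", ["Beta"])], "a")

def Spec_addFather (line_genus : List String) (nodes_cleared : List (String × List String)) (names_cleared : List (String × List String)) (father : String) (out : List String) : Prop := out = addFather_alt line_genus nodes_cleared names_cleared father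
instance (line_genus : List String) (nodes_cleared : List (String × List String)) (names_cleared : List (String × List String)) (father : String) (out : List String) : Decidable (Spec_addFather line_genus nodes_cleared names_cleared father out) := by unfold Spec_addFather; infer_instance

-- ===== CLAIM (what is proved, stated in full; the proofs are below) =====
def Claim_equal_addFather : Prop := ∀ (line_genus : List String) (nodes_cleared : List (String × List String)) (names_cleared : List (String × List String)) (father : String), Dom_addFather line_genus nodes_cleared names_cleared father → Pre_addFather line_genus nodes_cleared names_cleared father → Spec_addFather line_genus nodes_cleared names_cleared father (addFather line_genus nodes_cleared names_cleared father)

-- ===== LEMMAS AND PROOFS =====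

-- A's interleaved recursion equals "append the comprehension over the collected chain", for any fuel
lemma pvAddFatherGo_eq_chain (nodes_cleared names_cleared : List (String × List String)) :
    ∀ (fuel : Nat) (line_genus : List String) (father : String),
      pvAddFatherGo nodes_cleared names_cleared fuel line_genus father =
        line_genus ++ (pvChain nodes_cleared fuel father).filterMap
          (fun k => if pvRanks.contains ((pvGet nodes_cleared k).getD 1 "") then some ((pvGet names_cleared k).getD 0 "") else none) := by
  intro fuel
  induction fuel with
  | zero => intro lg f; simp [pvAddFatherGo, pvChain]
  | succ n ih =>
    intro lg f
    by_cases h : (pvGet nodes_cleared f).getD 0 "" ≠ "1"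
    · simp only [pvAddFatherGo, pvChain, if_pos h, ih, List.filterMap_cons]
      split_ifs with hr
      · simp
      · simp
    · simp only [pvAddFatherGo, pvChain, if_neg h, List.filterMap_nil, List.append_nil]

-- ===== VERDICT (by name: the statement is the Claim_ definition above) =====
theorem addFather_spec : Claim_equal_addFather := by
  intro line_genus nodes_cleared names_cleared father _ _
  unfold Spec_addFather addFather addFather_alt
  exact pvAddFatherGo_eq_chain nodes_cleared names_cleared _ line_genus father
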